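-- pv_equiv track=rewrite | github.com/aorursy/KT_dataset_py | balaka18_apriori-for-arm-association-rule-mining.py | stage_3
-- ===== SOURCE A (Python) =====
-- from itertools import combinations
--
-- def check_freq(curr,prev,n):
--
--     if n > 1:
--
--         subsets = list(combinations(curr,n))
--
--     else:
--
--         subsets = curr
--
--     for item in subsets:
--
--         if not item in prev:
--
--             return False
--
--         else:
--
--             return True
--
-- def sublist(i1,i2):
--
--     return set(i1) <= set(i2)
--
-- def stage_3(l2,records,min_sup):
--
--     l2 = list(l2.keys())
--
--     L2 = sorted(list(set([item for temp in l2 for item in temp])))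
--
--     L2 = list(combinations(L2,3))
--
--     c3,l3 = {},{}
--
--     for it1 in L2:
--
--         count = 0
--
--         for it2 in records:
--
--             if sublist(it1,it2):
--
--                 count += 1
--
--         c3[it1] = count
--
--     for key,val in c3.items():
--
--         if val >= min_sup:
--
--             if check_freq(key,l2,2):
--
--                 l3[key] = val
--
--     return c3,l3
-- ===== SOURCE B (Python) =====
-- from itertools import combinations
--
-- def stage_3(l2, records, min_sup):
--     keys = list(l2.keys())
--     items = sorted({it for k in keys for it in k})
--     # vertical representation: item -> set of record indices containing it
--     tids = {}
--     for idx, rec in enumerate(records):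
--         for it in rec:
--             tids.setdefault(it, set()).add(idx)
--     key_set = set(keys)
--     empty = set()
--     c3, l3 = {}, {}
--     for trip in combinations(items, 3):
--         a, b, c = trip
--         cnt = len(tids.get(a, empty) & tids.get(b, empty) & tids.get(c, empty))
--         c3[trip] = cnt
--         if cnt >= min_sup and all(p in key_set for p in combinations(trip, 2)):
--             l3[trip] = cnt
--     return c3, l3
-- ===== Notes on version B (the rewrite author's own statement) =====
-- stated objective: alternative
-- what changed: B builds a vertical tid-list index (item -> set of record indices) in one pass over the records and counts each candidate triple's support by intersecting three tid-sets, instead of A's per-candidate scan of every record; B's frequent-filter checks all three 2-subsets of a triple against l2 as Apriori prescribes.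
-- intended difference: On inputs where some candidate triple (a,b,c) meets min_sup and its pair (a,b) is a key of l2 but (a,c) or (b,c) is not, A still puts the triple in l3 because its check_freq returns after testing only the first 2-subset, while B omits it; Apriori's downward-closure pruning requires all 2-subsets to be frequent, so B's value is the intended one. — e.g. on stage_3([(["a", "b"], 1), (["c"], 0)], [["a", "b", "c"]], 1): A returns ([(["a", "b", "c"], 1)], [(["a", "b", "c"], 1)]), B returns ([(["a", "b", "c"], 1)], [])
import Mathlib
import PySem

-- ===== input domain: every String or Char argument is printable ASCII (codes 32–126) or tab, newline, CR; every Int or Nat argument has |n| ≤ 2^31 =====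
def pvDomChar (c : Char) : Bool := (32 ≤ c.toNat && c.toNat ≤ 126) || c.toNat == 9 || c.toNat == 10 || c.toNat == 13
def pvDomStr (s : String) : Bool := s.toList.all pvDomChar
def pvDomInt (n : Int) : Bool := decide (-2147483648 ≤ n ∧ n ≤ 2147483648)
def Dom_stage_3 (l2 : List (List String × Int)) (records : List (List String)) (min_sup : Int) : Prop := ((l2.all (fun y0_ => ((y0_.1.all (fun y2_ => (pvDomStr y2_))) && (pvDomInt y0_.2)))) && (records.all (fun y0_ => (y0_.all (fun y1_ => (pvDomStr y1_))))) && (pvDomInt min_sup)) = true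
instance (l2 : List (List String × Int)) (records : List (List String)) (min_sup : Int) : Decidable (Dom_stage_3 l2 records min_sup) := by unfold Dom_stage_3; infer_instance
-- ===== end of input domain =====

-- B replaces A's per-candidate scan over all records by a vertical item → record-index (tid-list)
-- index built in one pass over the records, and filters a frequent triple on ALL of its 2-subsets;
-- A's check_freq inspects only the first 2-subset — that l3 difference is stated as D_ below.

-- ===== PORT A =====
-- check_freq(curr, prev, 2): Python returns on the FIRST 2-subset only; it returns None (falsy,
-- used only in a boolean position) when there is no 2-subset — ported as false.
def checkFreqA (curr : List String) (prev : List (List String)) : Bool :=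
  match PySem.List.combinations curr 2 with
  | [] => false
  | item :: _ => prev.contains item

def sublistA (i1 i2 : List String) : Bool :=
  PySem.Set.issubset (PySem.Set.ofList i1) (PySem.Set.ofList i2)

def stage_3 (l2 : List (List String × Int)) (records : List (List String)) (min_sup : Int) : (List (List String × Int)) × (List (List String × Int)) :=
  let keys := (PySem.Dict.ofList l2).keys
  let L2s := PySem.List.sorted (PySem.Set.ofList (keys.flatMap (fun temp => temp))) (fun x => x) false
  let L2 := PySem.List.combinations L2s 3
  -- c3[it1] = count: the keys it1 are pairwise distinct 3-combinations of a dedup-sorted list,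
  -- so the dict assignment always appends a fresh key — ported as list append
  let c3 := L2.foldl (fun acc it1 =>
      let count := records.foldl (fun cnt it2 => if sublistA it1 it2 then cnt + 1 else cnt) (0 : Int)
      acc ++ [(it1, count)]) []
  let l3 := c3.foldl (fun acc kv =>
      if kv.2 ≥ min_sup then (if checkFreqA kv.1 keys then acc ++ [kv] else acc) else acc) []
  (c3, l3)

-- ===== PORT B =====
-- B-side helper: tids.setdefault(it, set()).add(idx) for every (idx, rec) in enumerate(records)
def pvBuildTids (records : List (List String)) : PySem.Dict String (List Int) :=
  (PySem.List.enumerate records).foldl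
    (fun d p => p.2.foldl (fun d it => d.modify it [] (fun s => PySem.Set.add s p.1)) d)
    PySem.Dict.empty

def stage_3_alt (l2 : List (List String × Int)) (records : List (List String)) (min_sup : Int) : (List (List String × Int)) × (List (List String × Int)) :=
  let keys := (PySem.Dict.ofList l2).keys
  let items := PySem.List.sorted (PySem.Set.ofList (keys.flatMap (fun k => k))) (fun x => x) false
  let tids := pvBuildTids records
  let keySet := PySem.Set.ofList keys
  (PySem.List.combinations items 3).foldl
    (fun (acc : (List (List String × Int)) × (List (List String × Int))) trip =>
      match trip with
      | [a, b, c] =>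
        let sb := tids.getD b []
        let sc := tids.getD c []
        let cnt := PySem.Set.len (PySem.Set.inter (PySem.Set.inter (tids.getD a []) sb) sc)
        if decide (cnt ≥ min_sup) && (PySem.List.combinations trip 2).all (fun p => PySem.Set.contains keySet p) then
          (acc.1 ++ [(trip, cnt)], acc.2 ++ [(trip, cnt)])
        else (acc.1 ++ [(trip, cnt)], acc.2)
      | _ => acc)  -- unreachable: every 3-combination has length 3 ('a, b, c = trip')
    ([], [])

-- ===== PRECONDITION & SPEC =====
-- On inputs where some candidate triple (a,b,c) of l2's items meets min_sup and its pair [a,b] is a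
-- key of l2 while [a,c] or [b,c] is not, A still puts the triple in l3 (its check_freq returns after
-- testing only the first 2-subset) whereas B omits it; Apriori's downward-closure pruning requires
-- ALL 2-subsets to be frequent, so B's value is the intended one.
def D_stage_3 (l2 : List (List String × Int)) (records : List (List String)) (min_sup : Int) : Prop :=
  ∃ t ∈ PySem.List.combinations (PySem.List.sorted (PySem.Set.ofList (l2.flatMap (·.1))) (fun x => x) false) 3,
    min_sup ≤ ((records.filter (fun r => t.all r.contains)).length : Int) ∧
    t.take 2 ∈ l2.map Prod.fst ∧
    ¬ ∀ p ∈ PySem.List.combinations t 2, p ∈ l2.map Prod.fst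
instance (l2 : List (List String × Int)) (records : List (List String)) (min_sup : Int) : Decidable (D_stage_3 l2 records min_sup) := by unfold D_stage_3; infer_instance

def Spec_stage_3 (l2 : List (List String × Int)) (records : List (List String)) (min_sup : Int) (out : (List (List String × Int)) × (List (List String × Int))) : Prop := ¬ D_stage_3 l2 records min_sup → out = stage_3_alt l2 records min_sup
instance (l2 : List (List String × Int)) (records : List (List String)) (min_sup : Int) (out : (List (List String × Int)) × (List (List String × Int))) : Decidable (Spec_stage_3 l2 records min_sup out) := by unfold Spec_stage_3; infer_instance

def pvDiffWitness_stage_3 : (List (List String × Int)) × List (List String) × Int :=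
  ([(["a", "b"], 1), (["c"], 0)], [["a", "b", "c"]], 1)
def pvDiffWitnessOut_stage_3 : ((List (List String × Int)) × (List (List String × Int))) × ((List (List String × Int)) × (List (List String × Int))) :=
  (([(["a", "b", "c"], 1)], [(["a", "b", "c"], 1)]), ([(["a", "b", "c"], 1)], []))

-- ===== CLAIM (what is proved, stated in full; the proofs are below) =====
def Claim_unchanged_stage_3 : Prop := ∀ (l2 : List (List String × Int)) (records : List (List String)) (min_sup : Int), Dom_stage_3 l2 records min_sup → Spec_stage_3 l2 records min_sup (stage_3 l2 records min_sup)
def Claim_changed_stage_3 : Prop := Dom_stage_3 (pvDiffWitness_stage_3.1) (pvDiffWitness_stage_3.2.1) (pvDiffWitness_stage_3.2.2) ∧ D_stage_3 (pvDiffWitness_stage_3.1) (pvDiffWitness_stage_3.2.1) (pvDiffWitness_stage_3.2.2) ∧ stage_3 (pvDiffWitness_stage_3.1) (pvDiffWitness_stage_3.2.1) (pvDiffWitness_stage_3.2.2) = pvDiffWitnessOut_stage_3.1 ∧ stage_3_alt (pvDiffWitness_stage_3.1) (pvDiffWitness_stage_3.2.1) (pvDiffWitness_stage_3.2.2) = pvDiffWitnessOut_stage_3.2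 ∧ pvDiffWitnessOut_stage_3.1 ≠ pvDiffWitnessOut_stage_3.2
def Claim_exact_stage_3 : Prop := ∀ (l2 : List (List String × Int)) (records : List (List String)) (min_sup : Int), Dom_stage_3 l2 records min_sup → D_stage_3 l2 records min_sup → stage_3 l2 records min_sup ≠ stage_3_alt l2 records min_sup

-- ===== LEMMAS AND PROOFS =====

-- proof-side abbreviations
def pvSupp (records : List (List String)) (a b c : String) : Int :=
  ((records.filter (fun r => r.contains a && r.contains b && r.contains c)).length : Int)

lemma pvInnerStep (rec : List String) (idx : Int) :
    ∀ (d : PySem.Dict String (List Int)) (it : String),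
    (rec.foldl (fun d it => d.modify it [] (fun s => PySem.Set.add s idx)) d).getD it [] =
      if rec.contains it && !(d.getD it []).contains idx then d.getD it [] ++ [idx]
      else d.getD it [] := by
  induction rec with
  | nil => intro d it; simp
  | cons x rest ih =>
    intro d it
    simp only [List.foldl_cons]
    rw [ih, PySem.Dict.getD_modify]
    by_cases hx : it = x
    · subst hx
      by_cases hc : idx ∈ d.getD it []
      · simp [PySem.Set.add, hc]
      · simp [PySem.Set.add, hc]
    · rw [if_neg hx]
      simp [hx]

lemma pvOuter (L : List (Int × List String)) :
    ∀ (d : PySem.Dict String (List Int)),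
    (∀ it' i, i ∈ d.getD it' [] → i ∉ L.map (·.1)) → (L.map (·.1)).Nodup →
    ∀ (it : String),
    (L.foldl (fun d p => p.2.foldl (fun d it => d.modify it [] (fun s => PySem.Set.add s p.1)) d) d).getD it [] =
      d.getD it [] ++ (L.filter (fun p => p.2.contains it)).map (·.1) := by
  induction L with
  | nil => intro d _ _ it; simp
  | cons p rest ih =>
    intro d hfresh hnd it
    simp only [List.foldl_cons]
    have hstep : ∀ it'', (p.2.foldl (fun d it => d.modify it [] (fun s => PySem.Set.add s p.1)) d).getD it'' [] =
        d.getD it'' [] ++ (if p.2.contains it'' then [p.1] else []) := by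
      intro it''
      rw [pvInnerStep]
      by_cases hm : it'' ∈ p.2
      · have : ¬ p.1 ∈ d.getD it'' [] := fun h => hfresh it'' p.1 h (by simp)
        simp [hm, this]
      · simp [hm]
    rw [ih _ ?fresh ?nd it, hstep it]
    case fresh =>
      intro it' i hi
      rw [hstep it'] at hi
      rcases List.mem_append.1 hi with h | h
      · exact fun hmem => hfresh it' i h (by simp [hmem])
      · have : i = p.1 := by by_cases hc : it' ∈ p.2 <;> simp [hc] at h; exact h
        subst this
        simp only [List.map_cons, List.nodup_cons] at hnd
        exact hnd.1
    case nd => simpa using (List.nodup_cons.1 (by simpa using hnd)).2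
    by_cases hm : it ∈ p.2 <;> simp [hm]

lemma pvEnumFstNodup (records : List (List String)) :
    ((PySem.List.enumerate records).map (·.1)).Nodup := by
  have := PySem.List.pairwise_lt_enumerate (xs := records) (s := 0)
  exact (List.pairwise_map.2 this).imp (fun h => ne_of_lt h)

lemma pvTids_getD (records : List (List String)) (it : String) :
    (pvBuildTids records).getD it [] =
      ((PySem.List.enumerate records).filter (fun p => p.2.contains it)).map (·.1) := by
  unfold pvBuildTids
  rw [pvOuter _ _ (by simp [PySem.Dict.getD_empty]) (pvEnumFstNodup records) it]
  simp [PySem.Dict.getD_empty]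

lemma sublistA_eq (i1 i2 : List String) : sublistA i1 i2 = i1.all (fun x => i2.contains x) := by
  unfold sublistA
  rcases Bool.eq_false_or_eq_true (i1.all (fun x => i2.contains x)) with h | h
  · rw [h]
    apply (PySem.Set.issubset_iff _ _).2
    intro x hx
    simp only [List.all_eq_true] at h
    have := h x (by simpa [PySem.Set.mem_ofList] using hx)
    simpa [PySem.Set.mem_ofList] using this
  · rw [h]
    rcases Bool.eq_false_or_eq_true (PySem.Set.issubset (PySem.Set.ofList i1) (PySem.Set.ofList i2)) with h2 | h2
    · exfalso
      have hsub := (PySem.Set.issubset_iff _ _).1 h2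
      simp only [List.all_eq_false] at h
      obtain ⟨x, hx, hnx⟩ := h
      have := hsub x (by simp [PySem.Set.mem_ofList, hx])
      simp only [PySem.Set.mem_ofList] at this
      simp [this] at hnx
    · exact h2

lemma pvMemTid (records : List (List String)) (x : String) (p : Int × List String)
    (hp : p ∈ PySem.List.enumerate records) :
    (((PySem.List.enumerate records).filter (fun q => q.2.contains x)).map (·.1)).contains p.1
      = p.2.contains x := by
  rcases Bool.eq_false_or_eq_true (p.2.contains x) with h | h <;> rw [h]
  · simp only [List.contains_eq_mem, decide_eq_true_eq]
    refine List.mem_map.2 ⟨p, List.mem_filter.2 ⟨hp, ?_⟩, rfl⟩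
    simpa using h
  · simp only [List.contains_eq_mem, decide_eq_false_iff_not]
    intro hmem
    simp only [List.mem_map, List.mem_filter] at hmem
    obtain ⟨q, ⟨hqE, hqx⟩, hq1⟩ := hmem
    have : q = p := List.inj_on_of_nodup_map (pvEnumFstNodup records) hqE hp hq1
    subst this
    simp only [List.contains_eq_mem] at h
    simp [hqx] at h

lemma pvCountSnd (records : List (List String)) (P : List String → Bool) :
    (PySem.List.enumerate records).countP (fun p => P p.2) = records.countP P := by
  conv_rhs => rw [← PySem.List.map_snd_enumerate records 0]
  rw [List.countP_map]
  rfl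

lemma pvCount_eq (records : List (List String)) (a b c : String) :
    (records.foldl (fun cnt it2 => if sublistA [a, b, c] it2 then cnt + 1 else cnt) (0 : Int)) =
    PySem.Set.len (PySem.Set.inter (PySem.Set.inter ((pvBuildTids records).getD a [])
        ((pvBuildTids records).getD b [])) ((pvBuildTids records).getD c [])) := by
  rw [PySem.List.foldl_if_add_one]
  have hfilt : PySem.Set.inter (PySem.Set.inter ((pvBuildTids records).getD a [])
        ((pvBuildTids records).getD b [])) ((pvBuildTids records).getD c []) =
      ((pvBuildTids records).getD a []).filter
        (fun i => ((pvBuildTids records).getD b []).contains i &&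
                  ((pvBuildTids records).getD c []).contains i) := by
    show ((((pvBuildTids records).getD a []).filter
        (fun i => ((pvBuildTids records).getD b []).contains i)).filter
        (fun i => ((pvBuildTids records).getD c []).contains i)) = _
    rw [List.filter_filter]
    refine List.filter_congr (fun i _ => ?_)
    cases ((pvBuildTids records).getD b []).contains i <;>
      cases ((pvBuildTids records).getD c []).contains i <;> rfl
  rw [hfilt]
  show _ = ((((pvBuildTids records).getD a []).filter
      (fun i => ((pvBuildTids records).getD b []).contains i &&
                ((pvBuildTids records).getD c []).contains i)).length : Int)
  rw [← List.countP_eq_length_filter]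
  rw [pvTids_getD records a]
  simp only [zero_add, Nat.cast_inj]
  rw [List.countP_map, List.countP_filter]
  rw [← pvCountSnd records (fun rec => sublistA [a, b, c] rec)]
  refine List.countP_congr (fun p hp => ?_)
  have heq : sublistA [a, b, c] p.2 =
      (((fun i => ((pvBuildTids records).getD b []).contains i &&
                  ((pvBuildTids records).getD c []).contains i) ∘ (fun x => x.1)) p
        && p.2.contains a) := by
    simp only [Function.comp_apply]
    rw [pvTids_getD records b, pvTids_getD records c, pvMemTid records b p hp, pvMemTid records c p hp]
    rw [sublistA_eq]
    simp only [List.all_cons, List.all_nil, Bool.and_true]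
    cases p.2.contains a <;> cases p.2.contains b <;> cases p.2.contains c <;> rfl
  rw [heq]

-- B's per-candidate count, as a function of the candidate
def pvCntB (tids : PySem.Dict String (List Int)) (t : List String) : Int :=
  match t with
  | [a, b, c] => PySem.Set.len (PySem.Set.inter (PySem.Set.inter (tids.getD a []) (tids.getD b [])) (tids.getD c []))
  | _ => 0

-- shared canonical pieces
def pvItemsSorted (l2 : List (List String × Int)) : List String :=
  PySem.List.sorted (PySem.Set.ofList (((PySem.Dict.ofList l2).keys).flatMap (fun temp => temp))) (fun x => x) false
def pvL (l2 : List (List String × Int)) : List (List String) := PySem.List.combinations (pvItemsSorted l2) 3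
def pvC3 (l2 : List (List String × Int)) (records : List (List String)) : List (List String × Int) :=
  (pvL l2).map (fun t => (t, pvCntB (pvBuildTids records) t))
def pvPA (l2 : List (List String × Int)) (min_sup : Int) (kv : List String × Int) : Bool :=
  decide (kv.2 ≥ min_sup) && checkFreqA kv.1 (PySem.Dict.ofList l2).keys
def pvPB (l2 : List (List String × Int)) (min_sup : Int) (kv : List String × Int) : Bool :=
  decide (kv.2 ≥ min_sup) && (PySem.List.combinations kv.1 2).all (fun p => PySem.Set.contains (PySem.Set.ofList (PySem.Dict.ofList l2).keys) p)

lemma pvSetContains {α : Type} [BEq α] [LawfulBEq α] (xs : List α) (v : α) :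
    PySem.Set.contains (PySem.Set.ofList xs) v = xs.contains v := by
  simp [PySem.Set.contains, PySem.Set.mem_ofList]

lemma pvLen3 (t : List String) (ht : t ∈ pvL l2) : t.length = 3 :=
  PySem.List.length_of_mem_combinations ht

lemma pvBFold (l2 : List (List String × Int)) (records : List (List String)) (min_sup : Int)
    (L : List (List String)) (h3 : ∀ t ∈ L, t.length = 3) :
    ∀ (x y : List (List String × Int)),
    L.foldl
      (fun (acc : (List (List String × Int)) × (List (List String × Int))) trip =>
        match trip with
        | [a, b, c] =>
          let sb := (pvBuildTids records).getD b []
          let sc := (pvBuildTids records).getD c []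
          let cnt := PySem.Set.len (PySem.Set.inter (PySem.Set.inter ((pvBuildTids records).getD a []) sb) sc)
          if decide (cnt ≥ min_sup) && (PySem.List.combinations trip 2).all (fun p => PySem.Set.contains (PySem.Set.ofList (PySem.Dict.ofList l2).keys) p) then
            (acc.1 ++ [(trip, cnt)], acc.2 ++ [(trip, cnt)])
          else (acc.1 ++ [(trip, cnt)], acc.2)
        | _ => acc)
      (x, y) =
    (x ++ L.map (fun t => (t, pvCntB (pvBuildTids records) t)),
     y ++ (L.map (fun t => (t, pvCntB (pvBuildTids records) t))).filter (pvPB l2 min_sup)) := by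
  induction L with
  | nil => intro x y; simp
  | cons t rest ih =>
    intro x y
    obtain ⟨a, b, c, rfl⟩ := List.length_eq_three.1 (h3 t (by simp))
    simp only [List.foldl_cons]
    by_cases hcond : (decide (PySem.Set.len (PySem.Set.inter (PySem.Set.inter ((pvBuildTids records).getD a [])
        ((pvBuildTids records).getD b [])) ((pvBuildTids records).getD c [])) ≥ min_sup) && (PySem.List.combinations [a, b, c] 2).all (fun p => PySem.Set.contains (PySem.Set.ofList (PySem.Dict.ofList l2).keys) p)) = true
    · rw [if_pos hcond, ih (fun t ht => h3 t (by simp [ht])) _ _]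
      simp only [List.map_cons, List.filter_cons, pvCntB, pvPB]
      rw [if_pos (by simpa using hcond)]
      simp [List.append_assoc]
    · rw [if_neg hcond, ih (fun t ht => h3 t (by simp [ht])) _ _]
      simp only [List.map_cons, List.filter_cons, pvCntB, pvPB]
      rw [if_neg (by simpa using hcond)]
      simp [List.append_assoc]

-- A's l3 loop is a filter
lemma pvAFilter (l2 : List (List String × Int)) (min_sup : Int) (c3l : List (List String × Int)) :
    c3l.foldl (fun acc kv =>
      if kv.2 ≥ min_sup then (if checkFreqA kv.1 (PySem.Dict.ofList l2).keys then acc ++ [kv] else acc) else acc) [] =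
    c3l.filter (pvPA l2 min_sup) := by
  have h1 := PySem.List.foldl_congr_mem
    (l := c3l) (init := ([] : List (List String × Int)))
    (f := fun acc kv =>
      if kv.2 ≥ min_sup then (if checkFreqA kv.1 (PySem.Dict.ofList l2).keys then acc ++ [kv] else acc) else acc)
    (g := fun acc kv => if pvPA l2 min_sup kv then acc ++ [kv] else acc)
    (by intro acc kv _
        by_cases hh1 : kv.2 ≥ min_sup <;> by_cases hh2 : checkFreqA kv.1 (PySem.Dict.ofList l2).keys <;>
          simp [pvPA, hh1, hh2])
  rw [h1, PySem.List.foldl_append_if_eq_filter]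
  simp

-- A's c3 fold is a map
lemma pvAMap (l2 : List (List String × Int)) (records : List (List String)) :
    (pvL l2).foldl (fun acc it1 =>
      let count := records.foldl (fun cnt it2 => if sublistA it1 it2 then cnt + 1 else cnt) (0 : Int)
      acc ++ [(it1, count)]) [] = pvC3 l2 records := by
  unfold pvC3
  rw [PySem.List.foldl_append_singleton_eq_map
    (f := fun it1 => (it1, records.foldl (fun cnt it2 => if sublistA it1 it2 then cnt + 1 else cnt) (0 : Int)))]
  simp only [List.nil_append]
  refine List.map_congr_left (fun t ht => ?_)
  obtain ⟨a, b, c, rfl⟩ := List.length_eq_three.1 (pvLen3 t ht)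
  simp only [pvCntB, Prod.mk.injEq, true_and]
  exact pvCount_eq records a b c

lemma pvCheckFreqA (a b c : String) (prev : List (List String)) :
    checkFreqA [a, b, c] prev = prev.contains [a, b] := rfl

lemma pvCombPairs (a b c : String) :
    PySem.List.combinations [a, b, c] 2 = [[a, b], [a, c], [b, c]] := rfl

-- both ports in canonical (map, filter) form
lemma pvAeq (l2 : List (List String × Int)) (records : List (List String)) (min_sup : Int) :
    stage_3 l2 records min_sup = (pvC3 l2 records, (pvC3 l2 records).filter (pvPA l2 min_sup)) := by
  have h0 : stage_3 l2 records min_sup =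
      ((pvL l2).foldl (fun acc it1 =>
          let count := records.foldl (fun cnt it2 => if sublistA it1 it2 then cnt + 1 else cnt) (0 : Int)
          acc ++ [(it1, count)]) [],
       ((pvL l2).foldl (fun acc it1 =>
          let count := records.foldl (fun cnt it2 => if sublistA it1 it2 then cnt + 1 else cnt) (0 : Int)
          acc ++ [(it1, count)]) []).foldl (fun acc kv =>
          if kv.2 ≥ min_sup then (if checkFreqA kv.1 (PySem.Dict.ofList l2).keys then acc ++ [kv] else acc) else acc) []) := rfl
  rw [h0, pvAMap l2 records, pvAFilter]

lemma pvBeq (l2 : List (List String × Int)) (records : List (List String)) (min_sup : Int) :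
    stage_3_alt l2 records min_sup = (pvC3 l2 records, (pvC3 l2 records).filter (pvPB l2 min_sup)) := by
  have h0 : stage_3_alt l2 records min_sup =
      (pvL l2).foldl
        (fun (acc : (List (List String × Int)) × (List (List String × Int))) trip =>
          match trip with
          | [a, b, c] =>
            let sb := (pvBuildTids records).getD b []
            let sc := (pvBuildTids records).getD c []
            let cnt := PySem.Set.len (PySem.Set.inter (PySem.Set.inter ((pvBuildTids records).getD a []) sb) sc)
            if decide (cnt ≥ min_sup) && (PySem.List.combinations trip 2).all (fun p => PySem.Set.contains (PySem.Set.ofList (PySem.Dict.ofList l2).keys) p) then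
              (acc.1 ++ [(trip, cnt)], acc.2 ++ [(trip, cnt)])
            else (acc.1 ++ [(trip, cnt)], acc.2)
          | _ => acc)
        ([], []) := rfl
  rw [h0, pvBFold l2 records min_sup _ pvLen3 [] []]
  simp [pvC3]

-- keys of Dict.ofList l2 have the same members as l2.map Prod.fst
lemma pvKeysMem (l2 : List (List String × Int)) (x : List String) :
    x ∈ (PySem.Dict.ofList l2).keys ↔ x ∈ l2.map Prod.fst := by
  have h : (PySem.Dict.ofList l2).keys = PySem.Set.ofList (l2.map Prod.fst) := by
    have h1 : PySem.Dict.ofList l2 = l2.foldl (fun d p => d.insert p.1 p.2) PySem.Dict.empty := rfl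
    rw [h1, PySem.Dict.keys_foldl_insert_key (key := Prod.fst) (f := fun _ p => p.2)]
    rw [PySem.Dict.keys_empty, PySem.Set.update_nil_left]
  rw [h, PySem.Set.mem_ofList]

-- D_'s item list is the ports' item list (same element set, same strict sort)
lemma pvDItemsEq (l2 : List (List String × Int)) :
    PySem.List.sorted (PySem.Set.ofList (l2.flatMap (·.1))) (fun x => x) false = pvItemsSorted l2 := by
  unfold pvItemsSorted
  refine PySem.List.sorted_eq_sorted_of_perm _ _ _ (fun a b h => h) ?_
  refine List.perm_of_nodup_nodup_toFinset_eq (PySem.Set.nodup_ofList _) (PySem.Set.nodup_ofList _) ?_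
  ext x
  simp only [List.mem_toFinset, PySem.Set.mem_ofList, List.mem_flatMap]
  constructor <;> rintro ⟨k, hk, hx⟩
  · exact ⟨k.1, (pvKeysMem l2 k.1).2 (List.mem_map.2 ⟨k, hk, rfl⟩), hx⟩
  · obtain ⟨p, hp, rfl⟩ := List.mem_map.1 ((pvKeysMem l2 k).1 hk)
    exact ⟨p, hp, hx⟩

-- the support count written with List.all = pvSupp
lemma pvSuppAll (records : List (List String)) (a b c : String) :
    ((records.filter (fun r => ([a, b, c] : List String).all r.contains)).length : Int) =
      pvSupp records a b c := by
  unfold pvSupp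
  refine congrArg Nat.cast (congrArg List.length (List.filter_congr (fun r _ => ?_)))
  by_cases h1 : a ∈ r <;> by_cases h2 : b ∈ r <;> by_cases h3 : c ∈ r <;> simp [h1, h2, h3]

-- cnt as counted by B's tid-list intersection = declarative support
lemma pvCntSupp (records : List (List String)) (a b c : String) :
    pvCntB (pvBuildTids records) [a, b, c] = pvSupp records a b c := by
  have hc : pvCntB (pvBuildTids records) [a, b, c] =
      PySem.Set.len (PySem.Set.inter (PySem.Set.inter ((pvBuildTids records).getD a [])
        ((pvBuildTids records).getD b [])) ((pvBuildTids records).getD c [])) := rfl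
  rw [hc, ← pvCount_eq records a b c, PySem.List.foldl_if_add_one]
  unfold pvSupp
  simp only [zero_add]
  rw [List.countP_eq_length_filter]
  refine congrArg Nat.cast (congrArg List.length (List.filter_congr (fun r _ => ?_)))
  rw [sublistA_eq]
  by_cases h1 : a ∈ r <;> by_cases h2 : b ∈ r <;> by_cases h3 : c ∈ r <;>
    simp [h1, h2, h3]

-- outside D_, A's single-pair check agrees with B's all-pairs check on every candidate
lemma pvPredCongr (l2 : List (List String × Int)) (records : List (List String)) (min_sup : Int)
    (hD : ¬ D_stage_3 l2 records min_sup) :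
    ∀ kv ∈ pvC3 l2 records, pvPA l2 min_sup kv = pvPB l2 min_sup kv := by
  intro kv hkv
  obtain ⟨t, ht, rfl⟩ := List.mem_map.1 hkv
  obtain ⟨a, b, c, rfl⟩ := List.length_eq_three.1 (pvLen3 t ht)
  unfold pvPA pvPB
  simp only [pvCheckFreqA, pvCombPairs, List.all_cons, List.all_nil, Bool.and_true, pvSetContains]
  by_cases hs : pvCntB (pvBuildTids records) ([a, b, c]) ≥ min_sup
  case neg => simp [hs]
  case pos =>
    by_cases h1 : [a, b] ∈ (PySem.Dict.ofList l2).keys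
    · by_cases h2 : [a, c] ∈ (PySem.Dict.ofList l2).keys ∧ [b, c] ∈ (PySem.Dict.ofList l2).keys
      · simp [hs, h1, h2.1, h2.2]
      · exfalso
        apply hD
        refine ⟨[a, b, c], ?_, ?_, ?_, ?_⟩
        · rw [pvDItemsEq]; exact ht
        · rw [pvSuppAll, ← pvCntSupp records a b c]; exact hs
        · show ([a, b, c] : List String).take 2 ∈ l2.map Prod.fst
          simpa using (pvKeysMem l2 [a, b]).1 h1
        · intro hall
          exact h2 ⟨(pvKeysMem l2 [a, c]).2 (hall [a, c] (by rw [pvCombPairs]; simp)),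
                    (pvKeysMem l2 [b, c]).2 (hall [b, c] (by rw [pvCombPairs]; simp))⟩
    · simp [hs, h1]

lemma pvAndSplit {a b : Bool} (h : (a && b) = true) : a = true ∧ b = true := by
  cases a <;> cases b <;> simp_all

lemma pvContainsMem {α : Type} [BEq α] [LawfulBEq α] (xs : List α) (v : α) :
    xs.contains v = true ↔ v ∈ xs := by
  simp [List.contains_eq_mem]

-- witness evaluation pieces (avoid kernel evaluation of String `<`)
lemma pvWitItems : pvItemsSorted [(["a", "b"], 1), (["c"], 0)] = ["a", "b", "c"] := by
  unfold pvItemsSorted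
  have h1 : PySem.Set.ofList (((PySem.Dict.ofList ([(["a", "b"], (1 : Int)), (["c"], 0)])).keys).flatMap (fun temp => temp)) = ["a", "b", "c"] := by decide
  rw [h1]
  refine PySem.List.sorted_eq_self_of_pairwise _ _ ?_
  refine List.pairwise_cons.2 ⟨?_, List.pairwise_cons.2 ⟨?_, List.pairwise_singleton _ _⟩⟩
  · intro y hy
    rcases List.mem_cons.1 hy with rfl | hy'
    · exact String.le_iff_toList_le.2 (by decide)
    · simp at hy'; subst hy'; exact String.le_iff_toList_le.2 (by decide)
  · intro y hy; simp at hy; subst hy; exact String.le_iff_toList_le.2 (by decide)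

lemma pvWitC3 : pvC3 [(["a", "b"], 1), (["c"], 0)] [["a", "b", "c"]] = [(["a", "b", "c"], 1)] := by
  unfold pvC3 pvL
  rw [pvWitItems]
  decide

lemma pvWitDItems :
    PySem.List.sorted (PySem.Set.ofList (([(["a", "b"], 1), (["c"], 0)] : List (List String × Int)).flatMap (·.1))) (fun x => x) false = ["a", "b", "c"] := by
  have h1 : PySem.Set.ofList (([(["a", "b"], 1), (["c"], 0)] : List (List String × Int)).flatMap (·.1)) = ["a", "b", "c"] := by decide
  rw [h1]
  refine PySem.List.sorted_eq_self_of_pairwise _ _ ?_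
  refine List.pairwise_cons.2 ⟨?_, List.pairwise_cons.2 ⟨?_, List.pairwise_singleton _ _⟩⟩
  · intro y hy
    rcases List.mem_cons.1 hy with rfl | hy'
    · exact String.le_iff_toList_le.2 (by decide)
    · simp at hy'; subst hy'; exact String.le_iff_toList_le.2 (by decide)
  · intro y hy; simp at hy; subst hy; exact String.le_iff_toList_le.2 (by decide)

lemma pvWitD : D_stage_3 [(["a", "b"], 1), (["c"], 0)] [["a", "b", "c"]] 1 := by
  refine ⟨["a", "b", "c"], ?_, by decide, by decide, by decide⟩
  rw [pvWitDItems]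
  decide

lemma pvWitA : stage_3 [(["a", "b"], 1), (["c"], 0)] [["a", "b", "c"]] 1 =
    ([(["a", "b", "c"], 1)], [(["a", "b", "c"], 1)]) := by
  rw [pvAeq, pvWitC3]
  decide

lemma pvWitB : stage_3_alt [(["a", "b"], 1), (["c"], 0)] [["a", "b", "c"]] 1 =
    ([(["a", "b", "c"], 1)], []) := by
  rw [pvBeq, pvWitC3]
  decide

-- ===== VERDICT (by name: the statement is the Claim_ definition above) =====
theorem stage_3_spec : Claim_unchanged_stage_3 := by
  intro l2 records min_sup _ hD
  rw [pvAeq, pvBeq]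
  exact Prod.ext rfl (List.filter_congr (pvPredCongr l2 records min_sup hD))

theorem stage_3_changed : Claim_changed_stage_3 := by
  unfold Claim_changed_stage_3
  exact ⟨by decide, pvWitD, pvWitA, pvWitB, by decide⟩

theorem stage_3_tight : Claim_exact_stage_3 := by
  intro l2 records min_sup _ hD heq
  obtain ⟨t, ht0, hsup0, hk1t, hnall⟩ := hD
  rw [pvAeq, pvBeq] at heq
  rw [pvDItemsEq] at ht0
  have ht : t ∈ pvL l2 := ht0
  obtain ⟨a, b, c, rfl⟩ := List.length_eq_three.1 (pvLen3 t ht)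
  have hsup : min_sup ≤ pvSupp records a b c := by rwa [pvSuppAll] at hsup0
  have hk1 : [a, b] ∈ l2.map Prod.fst := by simpa using hk1t
  have hfil : (pvC3 l2 records).filter (pvPA l2 min_sup) = (pvC3 l2 records).filter (pvPB l2 min_sup) :=
    congrArg Prod.snd heq
  have hmemC3 : ([a, b, c], pvCntB (pvBuildTids records) [a, b, c]) ∈ pvC3 l2 records :=
    List.mem_map.2 ⟨[a, b, c], ht, rfl⟩
  have hPA : pvPA l2 min_sup ([a, b, c], pvCntB (pvBuildTids records) [a, b, c]) = true := by
    unfold pvPA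
    simp only [pvCheckFreqA]
    have hx : decide (pvCntB (pvBuildTids records) [a, b, c] ≥ min_sup) = true :=
      decide_eq_true (by rw [pvCntSupp records a b c]; exact hsup)
    rw [hx, Bool.true_and]
    exact (pvContainsMem _ _).2 ((pvKeysMem l2 [a, b]).2 hk1)
  have hinA : ([a, b, c], pvCntB (pvBuildTids records) [a, b, c]) ∈
      (pvC3 l2 records).filter (pvPA l2 min_sup) := List.mem_filter.2 ⟨hmemC3, hPA⟩
  rw [hfil] at hinA
  have hPB := (List.mem_filter.1 hinA).2
  unfold pvPB at hPB
  rw [pvCombPairs] at hPB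
  simp only [List.all_cons, List.all_nil, Bool.and_true, pvSetContains] at hPB
  obtain ⟨-, h1'⟩ := pvAndSplit hPB
  obtain ⟨-, h2'⟩ := pvAndSplit h1'
  obtain ⟨hac, hbc'⟩ := pvAndSplit h2'
  apply hnall
  intro p hp
  rw [pvCombPairs] at hp
  rcases List.mem_cons.1 hp with rfl | hp'
  · exact hk1
  · rcases List.mem_cons.1 hp' with rfl | hp''
    · exact (pvKeysMem l2 [a, c]).1 ((pvContainsMem _ _).1 hac)
    · simp only [List.mem_singleton] at hp''
      subst hp''
      exact (pvKeysMem l2 [b, c]).1 ((pvContainsMem _ _).1 hbc')
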